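-- pv_equiv track=rewrite | github.com/grasshopperTrainer/coding_practice | baekjoon/accepted/1781 컵라면.py | solution
-- ===== SOURCE A (Python) =====
-- import heapq
--
-- def solution(N, problems):
--     problems.sort()
--     heap = []
--     for i, (dead, score) in enumerate(problems):
--         if dead <= len(heap):
--             heapq.heappop(heap)
--         heapq.heappush(heap, (score, dead))
--
--     return sum(map(lambda x: x[0], heap))
-- ===== SOURCE B (Python) =====
-- def solution(N, problems):
--     problems.sort()
--     kept = []  # scores of the kept problems, in ascending order
--     for dead, score in problems:
--         if dead <= len(kept):
--             kept.pop(0)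
--         i = 0
--         while i < len(kept) and kept[i] < score:
--             i += 1
--         kept.insert(i, score)
--     return sum(kept)
-- ===== Notes on version B (the rewrite author's own statement) =====
-- stated objective: alternative
-- what changed: Replaces heapq's binary heap of (score, deadline) pairs by a plain ascending list of kept scores maintained with linear insertion, popping the list head instead of heappop.
import Mathlib
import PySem

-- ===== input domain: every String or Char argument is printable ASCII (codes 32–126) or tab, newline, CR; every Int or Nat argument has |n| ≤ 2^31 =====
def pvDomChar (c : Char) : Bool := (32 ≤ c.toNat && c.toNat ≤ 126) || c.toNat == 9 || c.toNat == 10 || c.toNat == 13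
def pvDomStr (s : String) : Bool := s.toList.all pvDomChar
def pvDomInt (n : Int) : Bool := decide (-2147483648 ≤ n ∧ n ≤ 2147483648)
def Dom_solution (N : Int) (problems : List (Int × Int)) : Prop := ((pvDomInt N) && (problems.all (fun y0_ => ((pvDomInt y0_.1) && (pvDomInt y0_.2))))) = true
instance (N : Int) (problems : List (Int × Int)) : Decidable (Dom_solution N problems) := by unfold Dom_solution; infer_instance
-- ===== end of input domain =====

-- B replaces heapq's binary heap of (score, deadline) pairs by a plain ascending list of scores
-- (pop the head instead of heappop); equivalence is about the RETURN value — both Pythons also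
-- sort `problems` in place identically.

-- ===== PORT A =====
-- Python compares the heap's (score, dead) tuples lexicographically
def pairLt (a b : Int × Int) : Bool := a.1 < b.1 || (a.1 == b.1 && a.2 < b.2)

-- heapq's heap is modelled by a min-heap tree; heappush/heappop are ported by their
-- library semantics (exact on the observable heap contents: same multiset, pop returns the
-- tuple-lexicographic minimum, exactly as CPython's heapq)
inductive PHeap where
  | nil : PHeap
  | node : (Int × Int) → PHeap → PHeap → PHeap
deriving DecidableEq, Repr

def PHeap.size : PHeap → Nat
  | .nil => 0
  | .node _ l r => l.size + r.size + 1

def PHeap.merge : PHeap → PHeap → PHeap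
  | .nil, t => t
  | .node a l1 r1, .nil => .node a l1 r1
  | .node a l1 r1, .node b l2 r2 =>
    if pairLt b a then .node b (PHeap.merge (.node a l1 r1) r2) l2
    else .node a (PHeap.merge (.node b l2 r2) r1) l1
termination_by x y => x.size + y.size
decreasing_by all_goals (simp [PHeap.size]; try omega)

-- heapq.heappush(heap, x)
def PHeap.push (h : PHeap) (x : Int × Int) : PHeap := PHeap.merge (.node x .nil .nil) h

-- heapq.heappop(heap); none = IndexError on an empty heap
def PHeap.pop : PHeap → Option ((Int × Int) × PHeap)
  | .nil => none
  | .node v l r => some (v, l.merge r)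

def PHeap.toList : PHeap → List (Int × Int)
  | .nil => []
  | .node v l r => v :: (l.toList ++ r.toList)

-- one iteration of A's for-loop (the enumerate index i is unused); none = IndexError occurred
def stepA (st : Option PHeap) (p : Int × Int) : Option PHeap :=
  match st with
  | none => none
  | some h =>
    if p.1 ≤ (h.size : Int) then
      match h.pop with
      | none => none
      | some (_, h') => some (h'.push (p.2, p.1))
    else some (h.push (p.2, p.1))

def solution (N : Int) (problems : List (Int × Int)) : Int :=
  -- problems.sort(): Python's list sort on pairs = lexicographic, stable
  match (PySem.List.sorted2 problems Prod.fst Prod.snd).foldl stepA (some PHeap.nil) with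
  | none => 0   -- unreachable under Pre_solution: Python raises IndexError (heappop from empty heap)
  | some h => (h.toList.map Prod.fst).sum   -- sum(map(lambda x: x[0], heap))

-- ===== PORT B =====
-- the linear-scan insertion of Source B: insert s before the first element ≥ s
def insLin (ks : List Int) (s : Int) : List Int :=
  match ks with
  | [] => [s]
  | k :: t => if k < s then k :: insLin t s else s :: k :: t

-- one iteration of B's for-loop; none = IndexError (kept.pop(0) on the empty list)
def stepB (st : Option (List Int)) (p : Int × Int) : Option (List Int) :=
  match st with
  | none => none
  | some ks =>
    if p.1 ≤ (ks.length : Int) then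
      match ks with
      | [] => none
      | _ :: t => some (insLin t p.2)
    else some (insLin ks p.2)

def solution_alt (N : Int) (problems : List (Int × Int)) : Int :=
  -- problems.sort(): Python's list sort on pairs = lexicographic, stable
  match (PySem.List.sorted2 problems Prod.fst Prod.snd).foldl stepB (some []) with
  | none => 0   -- unreachable under Pre_solution: Python raises IndexError
  | some ks => ks.sum

-- ===== PRECONDITION & SPEC =====
-- Pre_ excludes exactly the inputs with a non-positive deadline, on which Python A raises
-- IndexError (heappop from an empty heap); Python B raises IndexError there too.
def Pre_solution (N : Int) (problems : List (Int × Int)) : Prop :=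
  ∀ p ∈ problems, 1 ≤ p.1
instance (N : Int) (problems : List (Int × Int)) : Decidable (Pre_solution N problems) := by
  unfold Pre_solution; infer_instance

def pvWitness_solution : Int × (List (Int × Int)) := (3, [(1, 5), (2, 3), (1, 7)])

def Spec_solution (N : Int) (problems : List (Int × Int)) (out : Int) : Prop := out = solution_alt N problems
instance (N : Int) (problems : List (Int × Int)) (out : Int) : Decidable (Spec_solution N problems out) := by unfold Spec_solution; infer_instance

-- ===== CLAIM (what is proved, stated in full; the proofs are below) =====
def Claim_equal_solution : Prop := ∀ (N : Int) (problems : List (Int × Int)), Dom_solution N problems → Pre_solution N problems → Spec_solution N problems (solution N problems)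

-- ===== LEMMAS AND PROOFS =====

def PHeap.toMul : PHeap → Multiset (Int × Int)
  | .nil => 0
  | .node v l r => v ::ₘ (l.toMul + r.toMul)

-- heap-order invariant: every element is ≥ the root, recursively
def PHeap.IsHeap : PHeap → Prop
  | .nil => True
  | .node v l r => (∀ x ∈ l.toMul + r.toMul, pairLt x v = false) ∧ l.IsHeap ∧ r.IsHeap

theorem pairLt_irrefl (a : Int × Int) : pairLt a a = false := by
  simp [pairLt]

theorem pairLt_asymm {a b : Int × Int} (h : pairLt a b = true) : pairLt b a = false := by
  simp only [pairLt, Bool.or_eq_true, Bool.and_eq_true, decide_eq_true_eq, beq_iff_eq,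
    Bool.or_eq_false_iff, Bool.and_eq_false_iff, decide_eq_false_iff_not,
    beq_eq_false_iff_ne, ne_eq, not_lt] at *
  omega

theorem pairLt_trans_neg {a b c : Int × Int} (hab : pairLt b a = false)
    (hbc : pairLt c b = false) : pairLt c a = false := by
  simp only [pairLt, Bool.or_eq_false_iff, Bool.and_eq_false_iff,
    decide_eq_false_iff_not, beq_iff_eq, beq_eq_false_iff_ne, ne_eq, not_lt] at *
  omega

theorem pairLt_fst_le {a b : Int × Int} (h : pairLt b a = false) : a.1 ≤ b.1 := by
  simp only [pairLt, Bool.or_eq_false_iff, decide_eq_false_iff_not, not_lt] at h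
  exact h.1

theorem merge_toMul (a b : PHeap) : (a.merge b).toMul = a.toMul + b.toMul := by
  fun_induction PHeap.merge a b with
  | case1 t => simp [PHeap.toMul]
  | case2 a l1 r1 => simp [PHeap.toMul]
  | case3 a l1 r1 b l2 r2 hlt ih =>
    simp only [PHeap.toMul, ih, ← Multiset.singleton_add]
    abel
  | case4 a l1 r1 b l2 r2 hlt ih =>
    simp only [PHeap.toMul, ih, ← Multiset.singleton_add]
    abel

theorem merge_isHeap {a b : PHeap} (ha : a.IsHeap) (hb : b.IsHeap) : (a.merge b).IsHeap := by
  fun_induction PHeap.merge a b with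
  | case1 t => exact hb
  | case2 a l1 r1 => exact ha
  | case3 a l1 r1 b l2 r2 hlt ih =>
    obtain ⟨haroot, hal, har⟩ := ha
    obtain ⟨hbroot, hbl, hbr⟩ := hb
    refine ⟨?_, ih ⟨haroot, hal, har⟩ hbr, hbl⟩
    intro x hx
    rw [merge_toMul] at hx
    simp only [PHeap.toMul, Multiset.mem_add, Multiset.mem_cons] at hx
    rcases hx with (((rfl | (hx | hx)) | hx) | hx)
    · exact pairLt_asymm hlt
    · exact pairLt_trans_neg (pairLt_asymm hlt) (haroot x (Multiset.mem_add.mpr (Or.inl hx)))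
    · exact pairLt_trans_neg (pairLt_asymm hlt) (haroot x (Multiset.mem_add.mpr (Or.inr hx)))
    · exact hbroot x (Multiset.mem_add.mpr (Or.inr hx))
    · exact hbroot x (Multiset.mem_add.mpr (Or.inl hx))
  | case4 a l1 r1 b l2 r2 hlt ih =>
    obtain ⟨haroot, hal, har⟩ := ha
    obtain ⟨hbroot, hbl, hbr⟩ := hb
    refine ⟨?_, ih ⟨hbroot, hbl, hbr⟩ har, hal⟩
    intro x hx
    rw [merge_toMul] at hx
    simp only [PHeap.toMul, Multiset.mem_add, Multiset.mem_cons] at hx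
    have hba : pairLt b a = false := by simpa using hlt
    rcases hx with (((rfl | (hx | hx)) | hx) | hx)
    · exact hba
    · exact pairLt_trans_neg hba (hbroot x (Multiset.mem_add.mpr (Or.inl hx)))
    · exact pairLt_trans_neg hba (hbroot x (Multiset.mem_add.mpr (Or.inr hx)))
    · exact haroot x (Multiset.mem_add.mpr (Or.inr hx))
    · exact haroot x (Multiset.mem_add.mpr (Or.inl hx))

theorem push_toMul (h : PHeap) (x : Int × Int) : (h.push x).toMul = x ::ₘ h.toMul := by
  simp [PHeap.push, merge_toMul, PHeap.toMul]

theorem push_isHeap {h : PHeap} (hh : h.IsHeap) (x : Int × Int) : (h.push x).IsHeap := by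
  refine merge_isHeap ?_ hh
  refine ⟨?_, trivial, trivial⟩
  intro y hy
  simp [PHeap.toMul] at hy

theorem root_min {v : Int × Int} {l r : PHeap} (hh : (PHeap.node v l r).IsHeap) :
    ∀ x ∈ (PHeap.node v l r).toMul, pairLt x v = false := by
  intro x hx
  simp only [PHeap.toMul, Multiset.mem_cons] at hx
  rcases hx with rfl | hx
  · exact pairLt_irrefl x
  · exact hh.1 x hx

theorem size_eq_card (h : PHeap) : h.size = h.toMul.card := by
  induction h with
  | nil => simp [PHeap.size, PHeap.toMul]
  | node v l r ihl ihr => simp [PHeap.size, PHeap.toMul, ihl, ihr]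

theorem toList_coe (h : PHeap) : (h.toList : Multiset (Int × Int)) = h.toMul := by
  induction h with
  | nil => simp [PHeap.toList, PHeap.toMul]
  | node v l r ihl ihr =>
    simp only [PHeap.toList, PHeap.toMul, ← Multiset.cons_coe]
    rw [← ihl, ← ihr, ← Multiset.coe_add]

theorem insLin_coe (ks : List Int) (s : Int) :
    ((insLin ks s : List Int) : Multiset Int) = s ::ₘ (ks : Multiset Int) := by
  induction ks with
  | nil => simp [insLin]
  | cons k t ih =>
    simp only [insLin]
    split
    · simp only [← Multiset.cons_coe, ih]
      rw [Multiset.cons_swap]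
    · simp [← Multiset.cons_coe]

theorem mem_insLin {ks : List Int} {s x : Int} (hx : x ∈ insLin ks s) : x = s ∨ x ∈ ks := by
  have : x ∈ ((insLin ks s : List Int) : Multiset Int) := by simpa using hx
  rw [insLin_coe] at this
  simpa using this

theorem insLin_sorted {ks : List Int} (hs : ks.Sorted (· ≤ ·)) (s : Int) :
    (insLin ks s).Sorted (· ≤ ·) := by
  induction ks with
  | nil => simp [insLin, List.sorted_singleton]
  | cons k t ih =>
    rw [List.sorted_cons] at hs
    simp only [insLin]
    split
    · rename_i hks
      rw [List.sorted_cons]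
      refine ⟨?_, ih hs.2⟩
      intro b hb
      rcases mem_insLin hb with rfl | hb
      · omega
      · exact hs.1 b hb
    · rename_i hks
      rw [List.sorted_cons]
      refine ⟨?_, by rw [List.sorted_cons]; exact hs⟩
      intro b hb
      simp only [List.mem_cons] at hb
      rcases hb with rfl | hb
      · omega
      · have := hs.1 b hb; omega

-- the simulation relation between A's heap and B's score list
def RelSt : Option PHeap → Option (List Int) → Prop
  | none, none => True
  | some h, some ks => h.IsHeap ∧ ks.Sorted (· ≤ ·) ∧ h.toMul.map Prod.fst = (ks : Multiset Int)
  | _, _ => False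

theorem relSt_step {st1 : Option PHeap} {st2 : Option (List Int)} (hr : RelSt st1 st2)
    (p : Int × Int) : RelSt (stepA st1 p) (stepB st2 p) := by
  match st1, st2 with
  | none, none => exact trivial
  | none, some _ => exact absurd hr (by simp [RelSt])
  | some _, none => exact absurd hr (by simp [RelSt])
  | some h, some ks =>
    obtain ⟨hh, hsort, hmul⟩ := hr
    have hlen : (h.size : Int) = (ks.length : Int) := by
      have : h.toMul.card = ks.length := by
        have := congrArg Multiset.card hmul
        simpa using this
      rw [size_eq_card, this]
    simp only [stepA, stepB, hlen]
    split
    · -- dead ≤ len: pop then push / pop(0) then insert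
      match h, ks with
      | PHeap.nil, ks =>
        have : (ks : Multiset Int) = 0 := by rw [← hmul]; simp [PHeap.toMul]
        have hks : ks = [] := by simpa using this
        subst hks
        exact trivial
      | PHeap.node v l r, [] =>
        exfalso
        have := congrArg Multiset.card hmul
        simp [PHeap.toMul] at this
      | PHeap.node v l r, k :: t =>
        simp only [PHeap.pop]
        have hmin : ∀ x ∈ (PHeap.node v l r).toMul, pairLt x v = false := root_min hh
        -- k = v.1 : both are the minimum value of the same score multiset
        have hmem_v1 : v.1 ∈ ((k :: t : List Int) : Multiset Int) := by
          rw [← hmul]; exact Multiset.mem_map_of_mem _ (by simp [PHeap.toMul])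
        have hk_le_v1 : k ≤ v.1 := by
          rw [Multiset.mem_coe, List.mem_cons] at hmem_v1
          rcases hmem_v1 with h1 | h1
          · omega
          · exact (List.sorted_cons.1 hsort).1 _ h1
        have hv1_le_k : v.1 ≤ k := by
          have : k ∈ (PHeap.node v l r).toMul.map Prod.fst := by rw [hmul]; simp
          rw [Multiset.mem_map] at this
          obtain ⟨x, hx, hxk⟩ := this
          have := pairLt_fst_le (hmin x hx)
          omega
        have hkv : k = v.1 := le_antisymm hk_le_v1 hv1_le_k
        have htail : (l.merge r).toMul.map Prod.fst = (t : Multiset Int) := by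
          have h1 : (PHeap.node v l r).toMul.map Prod.fst
              = v.1 ::ₘ (l.merge r).toMul.map Prod.fst := by
            simp [PHeap.toMul, merge_toMul, Multiset.map_cons]
          have h2 : ((k :: t : List Int) : Multiset Int) = k ::ₘ (t : Multiset Int) := by
            simp [← Multiset.cons_coe]
          rw [h1, h2, hkv] at hmul
          exact (Multiset.cons_inj_right _).1 hmul
        refine ⟨push_isHeap (merge_isHeap hh.2.1 hh.2.2) _,
          insLin_sorted (List.sorted_cons.1 hsort).2 _, ?_⟩
        rw [push_toMul, insLin_coe, Multiset.map_cons, htail]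
    · -- dead > len: push / insert only
      refine ⟨push_isHeap hh _, insLin_sorted hsort _, ?_⟩
      rw [push_toMul, insLin_coe, Multiset.map_cons, hmul]

theorem relSt_foldl (ps : List (Int × Int)) :
    ∀ (st1 : Option PHeap) (st2 : Option (List Int)), RelSt st1 st2 →
      RelSt (ps.foldl stepA st1) (ps.foldl stepB st2) := by
  induction ps with
  | nil => intro st1 st2 hr; simpa using hr
  | cons p ps ih =>
    intro st1 st2 hr
    simp only [List.foldl_cons]
    exact ih _ _ (relSt_step hr p)

theorem solution_eq (N : Int) (problems : List (Int × Int)) :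
    solution N problems = solution_alt N problems := by
  have hr := relSt_foldl (PySem.List.sorted2 problems Prod.fst Prod.snd)
    (some PHeap.nil) (some [])
    ⟨trivial, List.sorted_nil, by simp [PHeap.toMul]⟩
  unfold solution solution_alt
  generalize e1 : (PySem.List.sorted2 problems Prod.fst Prod.snd).foldl stepA
      (some PHeap.nil) = r1 at hr ⊢
  generalize e2 : (PySem.List.sorted2 problems Prod.fst Prod.snd).foldl stepB
      (some []) = r2 at hr ⊢
  match r1, r2 with
  | none, none => rfl
  | none, some _ => exact absurd hr (by simp [RelSt])
  | some _, none => exact absurd hr (by simp [RelSt])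
  | some h, some ks =>
    obtain ⟨_, _, hmul⟩ := hr
    show (h.toList.map Prod.fst).sum = ks.sum
    have h1 : ((h.toList.map Prod.fst : List Int) : Multiset Int)
        = ((ks : List Int) : Multiset Int) := by
      rw [← Multiset.map_coe, toList_coe, hmul]
    have h2 := congrArg Multiset.sum h1
    simpa using h2

-- ===== VERDICT (by name: the statement is the Claim_ definition above) =====
theorem solution_spec : Claim_equal_solution := by
  intro N problems _ _
  unfold Spec_solution
  exact solution_eq N problems
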